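-- pv_equiv track=rewrite | github.com/sohrabi2557/home_work_1 | subSeries.py | newNum
-- ===== SOURCE A (Python) =====
-- def newNum(number,n):
--     s = 0
--     j = n-number%10-1
--     k = j
--     for i in range(number%10+1,n+1):
--         s += i*(10**j)
--         j -= 1
--     result = str(number//(10)) + str(s)
--     return int(result)
-- ===== SOURCE B (Python) =====
-- def newNum(number, n):
--     # Closed form for s = sum_{i=d+1}^{n} i*10**(n-i) (arithmetico-geometric series),
--     # replacing A's O(n) loop by a constant number of bigint operations.
--     d = number % 10
--     M = n - d - 1  # highest power of 10 in the sum; M < 0 means empty sum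
--     if M < 0:
--         s = 0
--     else:
--         geom = (10 ** (M + 1) - 1) // 9                              # sum of 10**p, p=0..M
--         pgeom = (10 - (M + 1) * 10 ** (M + 1) + M * 10 ** (M + 2)) // 81  # sum of p*10**p
--         s = n * geom - pgeom
--     return int(str(number // 10) + str(s))
-- ===== Notes on version B (the rewrite author's own statement) =====
-- stated objective: faster
-- what changed: Replaces A's loop that accumulates sum_{i=d+1}^{n} i*10^(n-i) term by term with the exact arithmetico-geometric closed form n*geom - pgeom built from two divisions (by 9 and 81), keeping number%10 and number//10 and the final string concatenation unchanged.
import Mathlib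
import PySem

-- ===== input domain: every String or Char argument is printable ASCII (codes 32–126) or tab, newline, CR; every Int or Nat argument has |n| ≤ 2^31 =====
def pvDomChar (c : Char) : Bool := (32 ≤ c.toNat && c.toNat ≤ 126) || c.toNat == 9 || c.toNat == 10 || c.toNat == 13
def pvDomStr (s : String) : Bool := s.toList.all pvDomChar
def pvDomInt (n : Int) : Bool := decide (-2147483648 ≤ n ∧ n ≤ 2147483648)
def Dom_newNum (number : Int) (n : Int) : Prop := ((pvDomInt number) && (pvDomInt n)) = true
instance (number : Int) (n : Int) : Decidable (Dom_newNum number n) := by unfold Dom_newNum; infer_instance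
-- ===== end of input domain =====

-- B replaces A's O(n) summation loop by the exact arithmetico-geometric closed form of the sum.

-- ===== PORT A =====
-- In the Python loop j ≥ 0 on every executed iteration (j ends at 0 when i = n),
-- so 10 ** j is ported exactly as 10 ^ j.toNat.
def newNum (number : Int) (n : Int) : Int :=
  let s : Int := 0
  let j : Int := n - PySem.Int.mod number 10 - 1
  let st := (PySem.List.pyRange (PySem.Int.mod number 10 + 1) (n + 1) 1).foldl
      (fun (st : Int × Int) i => (st.1 + i * 10 ^ st.2.toNat, st.2 - 1)) (s, j)
  -- int(str(number//10) + str(s)); the parse of str(q)+str(s) always succeeds, .getD 0 is unreachable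
  (PySem.Int.ofChars? (PySem.Int.toChars (PySem.Int.floordiv number 10) ++ PySem.Int.toChars st.1)).getD 0

-- ===== PORT B =====
-- Exponents are only taken when M ≥ 0, so 10 ** e is ported exactly as 10 ^ e.toNat.
def newNum_alt (number : Int) (n : Int) : Int :=
  let d := PySem.Int.mod number 10
  let M := n - d - 1
  let s : Int :=
    if M < 0 then 0
    else
      let geom := PySem.Int.floordiv (10 ^ (M + 1).toNat - 1) 9
      let pgeom := PySem.Int.floordiv (10 - (M + 1) * 10 ^ (M + 1).toNat + M * 10 ^ (M + 2).toNat) 81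
      n * geom - pgeom
  (PySem.Int.ofChars? (PySem.Int.toChars (PySem.Int.floordiv number 10) ++ PySem.Int.toChars s)).getD 0

-- ===== PRECONDITION & SPEC =====
def Spec_newNum (number : Int) (n : Int) (out : Int) : Prop := out = newNum_alt number n
instance (number : Int) (n : Int) (out : Int) : Decidable (Spec_newNum number n out) := by unfold Spec_newNum; infer_instance

-- ===== CLAIM (what is proved, stated in full; the proofs are below) =====
def Claim_equal_newNum : Prop := ∀ (number : Int) (n : Int), Dom_newNum number n → Spec_newNum number n (newNum number n)

-- ===== LEMMAS AND PROOFS =====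

-- pvT m b = Σ_{p=0}^{m} (b - p) * 10^p, the value A's loop accumulates (peeled from the front).
def pvT : Nat → Int → Int
  | 0, b => b
  | m + 1, b => (b - (m + 1)) * 10 ^ (m + 1) + pvT m b

-- pvG m = Σ_{p=0}^{m} 10^p,  pvP m = Σ_{p=0}^{m} p * 10^p
def pvG : Nat → Int
  | 0 => 1
  | m + 1 => pvG m + 10 ^ (m + 1)

def pvP : Nat → Int
  | 0 => 0
  | m + 1 => pvP m + (m + 1) * 10 ^ (m + 1)

theorem pv_loop_sum (m : Nat) : ∀ (b s : Int),
    ((PySem.List.pyRange (b - m) (b + 1) 1).foldl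
      (fun (st : Int × Int) i => (st.1 + i * 10 ^ st.2.toNat, st.2 - 1)) (s, (m : Int))).1
      = s + pvT m b := by
  induction m with
  | zero =>
    intro b s
    simp only [Nat.cast_zero, sub_zero]
    rw [PySem.List.pyRange_one_cons (by omega), PySem.List.pyRange_one_eq_nil (by omega)]
    simp [pvT]
  | succ m ih =>
    intro b s
    rw [PySem.List.pyRange_one_cons (by omega)]
    simp only [List.foldl_cons]
    have h1 : b - ((m : Int) + 1) + 1 = b - (m : Int) := by ring
    have h2 : ((m : Int) + 1).toNat = m + 1 := by omega
    have h3 : (m : Int) + 1 - 1 = (m : Int) := by ring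
    rw [show ((m + 1 : Nat) : Int) = (m : Int) + 1 by push_cast; ring, h1, h2, h3, ih]
    simp [pvT]; ring_nf

theorem pv_nine_G (m : Nat) : 9 * pvG m = 10 ^ (m + 1) - 1 := by
  induction m with
  | zero => simp [pvG]
  | succ m ih => simp only [pvG]; rw [mul_add, ih]; ring

theorem pv_eightyone_P (m : Nat) :
    81 * pvP m = 10 - ((m : Int) + 1) * 10 ^ (m + 1) + (m : Int) * 10 ^ (m + 2) := by
  induction m with
  | zero => simp [pvP]
  | succ m ih =>
    simp only [pvP]
    rw [mul_add, ih]
    push_cast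
    ring_nf

theorem pv_T_closed (m : Nat) (b : Int) : pvT m b = b * pvG m - pvP m := by
  induction m with
  | zero => simp [pvT, pvG, pvP]
  | succ m ih => simp only [pvT, pvG, pvP, ih]; ring_nf

theorem pv_fdiv_exact (c q : Int) (hc : 0 < c) : PySem.Int.floordiv (c * q) c = q := by
  rw [PySem.Int.floordiv_eq_ediv_of_pos hc, Int.mul_ediv_cancel_left q (by omega)]

-- ===== VERDICT (by name: the statement is the Claim_ definition above) =====
theorem newNum_spec : Claim_equal_newNum := by
  intro number n _
  unfold Spec_newNum newNum newNum_alt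
  simp only []
  set d := PySem.Int.mod number 10 with hd
  -- it suffices that the two sums agree
  congr 2
  by_cases hM : n - d - 1 < 0
  · -- empty range: both sums are 0
    rw [if_pos hM, PySem.List.pyRange_one_eq_nil (by omega)]
    simp
  · rw [if_neg hM]
    replace hM : 0 ≤ n - d - 1 := by omega
    set m := (n - d - 1).toNat with hm
    have hmi : (m : Int) = n - d - 1 := by omega
    have hstart : d + 1 = n - (m : Int) := by omega
    rw [hstart, show n - d - 1 = (m : Int) from hmi.symm, pv_loop_sum m n 0]
    have h1 : ((m : Int) + 1).toNat = m + 1 := by omega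
    have h2 : ((m : Int) + 2).toNat = m + 2 := by omega
    rw [h1, h2]
    have hg : PySem.Int.floordiv (10 ^ (m + 1) - 1) 9 = pvG m := by
      rw [show (10:Int) ^ (m + 1) - 1 = 9 * pvG m from (pv_nine_G m).symm]
      exact pv_fdiv_exact 9 (pvG m) (by norm_num)
    have hp : PySem.Int.floordiv (10 - ((m : Int) + 1) * 10 ^ (m + 1) + (m : Int) * 10 ^ (m + 2)) 81 = pvP m := by
      rw [show (10:Int) - ((m : Int) + 1) * 10 ^ (m + 1) + (m : Int) * 10 ^ (m + 2) = 81 * pvP m from (pv_eightyone_P m).symm]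
      exact pv_fdiv_exact 81 (pvP m) (by norm_num)
    rw [hg, hp, pv_T_closed m n]
    ring
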